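-- pv_equiv track=rewrite | github.com/ksherlock/kcalc | kcalc/calc.py | dot_magic_signed
-- ===== SOURCE A (Python) =====
-- def dot_magic_signed(d, bits):
--
-- 	two31 = 1 << (bits-1)
-- 	two32 = 1 << bits
-- 	two31m1 = two31-1
--
-- 	ad = abs(d)
--
-- 	t = two31 + (d >> (bits - 1))
-- 	anc = t - 1 - t%ad
-- 	p = bits - 1
-- 	q1 = two31 // anc
-- 	r1 = two31 - (q1 * anc)
-- 	q2 = two31 // ad
-- 	r2 = two31 - (q2 * ad)
--
--
-- 	while True:
-- 		p += 1
-- 		q1 *= 2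
-- 		r1 *= 2
-- 		if r1 >= anc:
-- 			q1 += 1
-- 			r1 -= anc
-- 		q2 *= 2
-- 		r2 *= 2
-- 		if r2 >= ad:
-- 			q2 += 1
-- 			r2 -= ad
-- 		delta = ad - r2
--
-- 		if q1 < delta: continue
-- 		if (q1 == delta) and (r1 == 0): continue
-- 		break
--
--
-- 	magic = q2 + 1
-- 	if d < 0: magic = two32 - magic
-- 	shift = p - bits
-- 	return magic, shift, False
-- ===== SOURCE B (Python) =====
-- def dot_magic_signed(d, bits):
--     # Same outer loop and termination test as the original, but stateless:
--     # instead of carrying incrementally-doubled quotients/remainders, each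
--     # iteration recomputes them directly with divmod(1 << p, ...).
--     two31 = 1 << (bits - 1)
--     two32 = 1 << bits
--     ad = abs(d)
--     t = two31 + (d >> (bits - 1))
--     anc = t - 1 - t % ad
--     p = bits - 1
--     while True:
--         p += 1
--         q1, r1 = divmod(1 << p, anc)
--         q2, r2 = divmod(1 << p, ad)
--         delta = ad - r2
--         if q1 < delta or (q1 == delta and r1 == 0):
--             continue
--         break
--     magic = q2 + 1
--     if d < 0:
--         magic = two32 - magic
--     return magic, p - bits, False
-- ===== Notes on version B (the rewrite author's own statement) =====
-- stated objective: simpler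
-- what changed: The loop no longer carries incrementally doubled quotient/remainder state (q1,r1,q2,r2 with conditional carry); each iteration recomputes them statelessly as divmod(1 << p, anc) and divmod(1 << p, ad), leaving p as the only loop variable.
import Mathlib
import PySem

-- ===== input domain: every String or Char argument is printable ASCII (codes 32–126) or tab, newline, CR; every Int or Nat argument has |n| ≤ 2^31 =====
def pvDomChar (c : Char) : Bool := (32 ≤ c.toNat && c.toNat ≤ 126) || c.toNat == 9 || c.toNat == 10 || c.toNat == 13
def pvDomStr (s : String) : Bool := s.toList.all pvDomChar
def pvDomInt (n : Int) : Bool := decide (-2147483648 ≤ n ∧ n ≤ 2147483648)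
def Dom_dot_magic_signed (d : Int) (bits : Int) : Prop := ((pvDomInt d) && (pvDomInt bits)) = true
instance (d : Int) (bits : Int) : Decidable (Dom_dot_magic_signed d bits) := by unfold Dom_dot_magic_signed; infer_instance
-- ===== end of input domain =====

-- B keeps A's loop and exit test but drops the carried quotient/remainder state,
-- recomputing q/r each iteration by direct division (simpler decomposition, not faster).


-- ===== PORT A =====
-- A's while-loop, carrying state (p, q1, r1, q2, r2); fuel only makes the
-- recursion total (inside Pre_ the loop always breaks long before fuel runs out).
def aLoopGo (anc ad : Int) : Nat → Int → Int → Int → Int → Int → Int × Int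
  | 0, p, _q1, _r1, q2, _r2 => (q2, p)
  | fuel+1, p, q1, r1, q2, r2 =>
    let p' := p + 1
    let q1a := q1 * 2
    let r1a := r1 * 2
    let q1b := if r1a ≥ anc then q1a + 1 else q1a
    let r1b := if r1a ≥ anc then r1a - anc else r1a
    let q2a := q2 * 2
    let r2a := r2 * 2
    let q2b := if r2a ≥ ad then q2a + 1 else q2a
    let r2b := if r2a ≥ ad then r2a - ad else r2a
    let delta := ad - r2b
    if q1b < delta then aLoopGo anc ad fuel p' q1b r1b q2b r2b
    else if q1b = delta ∧ r1b = 0 then aLoopGo anc ad fuel p' q1b r1b q2b r2b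
    else (q2b, p')

def dot_magic_signed (d : Int) (bits : Int) : Int × Int × Bool :=
  let two31 : Int := (1 : Int) <<< (bits - 1).toNat
  let two32 : Int := (1 : Int) <<< bits.toNat
  let ad := |d|
  let t := two31 + (d >>> (bits - 1).toNat)
  let anc := t - 1 - PySem.Int.mod t ad
  let q1 := PySem.Int.floordiv two31 anc
  let r1 := two31 - q1 * anc
  let q2 := PySem.Int.floordiv two31 ad
  let r2 := two31 - q2 * ad
  let res := aLoopGo anc ad (bits.toNat + 100) (bits - 1) q1 r1 q2 r2
  let magic := res.1 + 1
  let magic := if d < 0 then two32 - magic else magic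
  (magic, res.2 - bits, false)

-- ===== PORT B =====
-- B's while-loop carries only p; q/r are recomputed by divmod each iteration.
def bLoopGo (anc ad : Int) : Nat → Int → Int × Int
  | 0, p => (PySem.Int.floordiv ((1 : Int) <<< p.toNat) ad, p)
  | fuel+1, p =>
    let p' := p + 1
    let x := (1 : Int) <<< p'.toNat
    let q1 := PySem.Int.floordiv x anc
    let r1 := PySem.Int.mod x anc
    let q2 := PySem.Int.floordiv x ad
    let r2 := PySem.Int.mod x ad
    let delta := ad - r2
    if q1 < delta ∨ (q1 = delta ∧ r1 = 0) then bLoopGo anc ad fuel p'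
    else (q2, p')

def dot_magic_signed_alt (d : Int) (bits : Int) : Int × Int × Bool :=
  let two31 : Int := (1 : Int) <<< (bits - 1).toNat
  let two32 : Int := (1 : Int) <<< bits.toNat
  let ad := |d|
  let t := two31 + (d >>> (bits - 1).toNat)
  let anc := t - 1 - PySem.Int.mod t ad
  let res := bLoopGo anc ad (bits.toNat + 100) (bits - 1)
  let magic := res.1 + 1
  let magic := if d < 0 then two32 - magic else magic
  (magic, res.2 - bits, false)

-- ===== PRECONDITION & SPEC =====
-- Pre_ excludes exactly the inputs where Python A does not return: bits < 1
-- (negative shift: ValueError) or d = 0 (ZeroDivisionError) or anc ≤ 0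
-- (anc = 0 divides by zero; anc < 0 makes the loop never terminate).
def Pre_dot_magic_signed (d : Int) (bits : Int) : Prop :=
  1 ≤ bits ∧ d ≠ 0 ∧
  1 ≤ ((1 : Int) <<< (bits - 1).toNat + (d >>> (bits - 1).toNat)) - 1 -
      PySem.Int.mod ((1 : Int) <<< (bits - 1).toNat + (d >>> (bits - 1).toNat)) |d|
instance (d : Int) (bits : Int) : Decidable (Pre_dot_magic_signed d bits) := by
  unfold Pre_dot_magic_signed; infer_instance

def pvWitness_dot_magic_signed : Int × Int := (7, 8)

def Spec_dot_magic_signed (d : Int) (bits : Int) (out : Int × Int × Bool) : Prop := out = dot_magic_signed_alt d bits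
instance (d : Int) (bits : Int) (out : Int × Int × Bool) : Decidable (Spec_dot_magic_signed d bits out) := by unfold Spec_dot_magic_signed; infer_instance

-- ===== CLAIM (what is proved, stated in full; the proofs are below) =====
def Claim_equal_dot_magic_signed : Prop := ∀ (d : Int) (bits : Int), Dom_dot_magic_signed d bits → Pre_dot_magic_signed d bits → Spec_dot_magic_signed d bits (dot_magic_signed d bits)

-- ===== LEMMAS AND PROOFS =====

lemma shift_succ (p : Int) (hp : 0 ≤ p) :
    (1 : Int) <<< (p + 1).toNat = 2 * ((1 : Int) <<< p.toNat) := by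
  have h : (p + 1).toNat = p.toNat + 1 := by omega
  rw [h]; simp [Int.shiftLeft_eq]; ring

-- doubling a floor-divmod pair with a conditional carry equals the divmod of the double
lemma double_div (m x : Int) (hm : 0 < m) :
    PySem.Int.floordiv (2 * x) m =
      (if m ≤ PySem.Int.mod x m * 2 then PySem.Int.floordiv x m * 2 + 1
       else PySem.Int.floordiv x m * 2) ∧
    PySem.Int.mod (2 * x) m =
      (if m ≤ PySem.Int.mod x m * 2 then PySem.Int.mod x m * 2 - m
       else PySem.Int.mod x m * 2) := by
  have h1 := PySem.Int.floordiv_mul_add_mod x m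
  have h2 := PySem.Int.mod_nonneg x hm
  have h3 := PySem.Int.mod_lt x hm
  have h4 := PySem.Int.floordiv_mul_add_mod (2 * x) m
  have hq : PySem.Int.floordiv (2 * x) m =
      (if m ≤ PySem.Int.mod x m * 2 then PySem.Int.floordiv x m * 2 + 1
       else PySem.Int.floordiv x m * 2) := by
    split_ifs with hc
    · rw [PySem.Int.floordiv_eq_iff_of_pos hm]
      constructor <;> nlinarith
    · rw [PySem.Int.floordiv_eq_iff_of_pos hm]
      constructor <;> nlinarith
  refine ⟨hq, ?_⟩
  rw [hq] at h4
  split_ifs at h4 ⊢ with hc <;> nlinarith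
lemma loop_eq (anc ad : Int) (ha : 0 < anc) (hd : 0 < ad) :
    ∀ (fuel : Nat) (p : Int), 0 ≤ p →
      aLoopGo anc ad fuel p
        (PySem.Int.floordiv ((1 : Int) <<< p.toNat) anc)
        (PySem.Int.mod ((1 : Int) <<< p.toNat) anc)
        (PySem.Int.floordiv ((1 : Int) <<< p.toNat) ad)
        (PySem.Int.mod ((1 : Int) <<< p.toNat) ad)
      = bLoopGo anc ad fuel p := by
  intro fuel
  induction fuel with
  | zero => intro p hp; simp [aLoopGo, bLoopGo]
  | succ n ih =>
    intro p hp
    have hx := shift_succ p hp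
    have d1 := double_div anc ((1 : Int) <<< p.toNat) ha
    have d2 := double_div ad ((1 : Int) <<< p.toNat) hd
    simp only [aLoopGo, bLoopGo, ge_iff_le, hx]
    rw [← d1.1, ← d1.2, ← d2.1, ← d2.2]
    by_cases h1 : PySem.Int.floordiv (2 * ((1 : Int) <<< p.toNat)) anc <
        ad - PySem.Int.mod (2 * ((1 : Int) <<< p.toNat)) ad
    · simp only [if_pos h1, if_pos (Or.inl h1)]
      have := ih (p + 1) (by omega)
      rw [hx] at this
      exact this
    · simp only [if_neg h1]
      by_cases h2 : PySem.Int.floordiv (2 * ((1 : Int) <<< p.toNat)) anc =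
          ad - PySem.Int.mod (2 * ((1 : Int) <<< p.toNat)) ad ∧
          PySem.Int.mod (2 * ((1 : Int) <<< p.toNat)) anc = 0
      · simp only [if_pos h2, if_pos (Or.inr h2)]
        have := ih (p + 1) (by omega)
        rw [hx] at this
        exact this
      · have : ¬ (PySem.Int.floordiv (2 * ((1 : Int) <<< p.toNat)) anc <
            ad - PySem.Int.mod (2 * ((1 : Int) <<< p.toNat)) ad ∨
            (PySem.Int.floordiv (2 * ((1 : Int) <<< p.toNat)) anc =
            ad - PySem.Int.mod (2 * ((1 : Int) <<< p.toNat)) ad ∧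
            PySem.Int.mod (2 * ((1 : Int) <<< p.toNat)) anc = 0)) := by tauto
        simp only [if_neg h2, if_neg this]

-- ===== VERDICT (by name: the statement is the Claim_ definition above) =====
theorem dot_magic_signed_spec : Claim_equal_dot_magic_signed := by
  intro d bits _hdom hpre
  obtain ⟨hb, hd0, hanc⟩ := hpre
  unfold Spec_dot_magic_signed dot_magic_signed dot_magic_signed_alt
  simp only
  have had : (0 : Int) < |d| := abs_pos.mpr hd0
  have hp0 : (0 : Int) ≤ bits - 1 := by omega
  have hanc' : (0 : Int) <
      ((1 : Int) <<< (bits - 1).toNat + (d >>> (bits - 1).toNat)) - 1 -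
        PySem.Int.mod ((1 : Int) <<< (bits - 1).toNat + (d >>> (bits - 1).toNat)) |d| := by
    omega
  have hloop := loop_eq _ |d| hanc' had (bits.toNat + 100) (bits - 1) hp0
  have hr1 := PySem.Int.floordiv_mul_add_mod ((1 : Int) <<< (bits - 1).toNat)
      (((1 : Int) <<< (bits - 1).toNat + (d >>> (bits - 1).toNat)) - 1 -
        PySem.Int.mod ((1 : Int) <<< (bits - 1).toNat + (d >>> (bits - 1).toNat)) |d|)
  have hr2 := PySem.Int.floordiv_mul_add_mod ((1 : Int) <<< (bits - 1).toNat) |d|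
  rw [show PySem.Int.mod ((1 : Int) <<< (bits - 1).toNat)
        (((1 : Int) <<< (bits - 1).toNat + (d >>> (bits - 1).toNat)) - 1 -
          PySem.Int.mod ((1 : Int) <<< (bits - 1).toNat + (d >>> (bits - 1).toNat)) |d|) =
      (1 : Int) <<< (bits - 1).toNat -
        PySem.Int.floordiv ((1 : Int) <<< (bits - 1).toNat)
          (((1 : Int) <<< (bits - 1).toNat + (d >>> (bits - 1).toNat)) - 1 -
            PySem.Int.mod ((1 : Int) <<< (bits - 1).toNat + (d >>> (bits - 1).toNat)) |d|) *
          (((1 : Int) <<< (bits - 1).toNat + (d >>> (bits - 1).toNat)) - 1 -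
            PySem.Int.mod ((1 : Int) <<< (bits - 1).toNat + (d >>> (bits - 1).toNat)) |d|)
      by omega,
    show PySem.Int.mod ((1 : Int) <<< (bits - 1).toNat) |d| =
      (1 : Int) <<< (bits - 1).toNat -
        PySem.Int.floordiv ((1 : Int) <<< (bits - 1).toNat) |d| * |d| by omega] at hloop
  rw [hloop]
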